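-- pv_equiv track=rewrite | github.com/afont1978/QDTMOV | src/mobility_os/runtime/propagation.py | _default_dependencies
-- ===== SOURCE A (Python) =====
-- from collections import defaultdict, deque
-- from typing import Any, Dict, List, Tuple
--
-- def _default_dependencies(primary_hotspots: List[str]) -> Dict[str, List[str]]:
--     deps: Dict[str, List[str]] = defaultdict(list)
--     for idx, name in enumerate(primary_hotspots):
--         if idx > 0:
--             deps[name].append(primary_hotspots[idx - 1])
--         if idx < len(primary_hotspots) - 1:
--             deps[name].append(primary_hotspots[idx + 1])
--     return dict(deps)
-- ===== SOURCE B (Python) =====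
-- from typing import Dict, List
--
--
-- def _default_dependencies(primary_hotspots: List[str]) -> Dict[str, List[str]]:
--     xs = primary_hotspots
--     n = len(xs)
--     if n < 2:
--         return {}
--     # Stage 1: inverted index — occurrence positions of each name, in first-occurrence order.
--     occ: Dict[str, List[int]] = {}
--     for i, x in enumerate(xs):
--         occ.setdefault(x, []).append(i)
--     # Stage 2: per name, gather the in-range neighbors of all its occurrences in index order.
--     return {name: [xs[j] for i in idxs for j in (i - 1, i + 1) if 0 <= j < n]
--             for name, idxs in occ.items()}
-- ===== Notes on version B (the rewrite author's own statement) =====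
-- stated objective: alternative
-- what changed: Replaces A's single index loop that interleaves neighbor computation with defaultdict accumulation by a grouped two-stage construction: first an inverted index mapping each name to its occurrence positions, then a dict comprehension that per name gathers the in-range neighbors of all its occurrences in index order.
import Mathlib
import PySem

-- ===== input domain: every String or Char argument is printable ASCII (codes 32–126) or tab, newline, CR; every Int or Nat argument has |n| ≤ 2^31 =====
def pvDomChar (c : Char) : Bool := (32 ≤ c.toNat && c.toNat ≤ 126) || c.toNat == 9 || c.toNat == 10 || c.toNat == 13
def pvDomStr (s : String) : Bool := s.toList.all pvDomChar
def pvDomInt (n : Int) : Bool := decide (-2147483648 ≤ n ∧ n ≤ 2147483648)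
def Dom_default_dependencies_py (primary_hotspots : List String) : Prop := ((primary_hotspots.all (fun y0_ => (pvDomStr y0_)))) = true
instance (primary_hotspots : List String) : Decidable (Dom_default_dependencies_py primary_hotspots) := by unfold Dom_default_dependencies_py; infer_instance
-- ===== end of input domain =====

-- B replaces A's single index loop accumulating neighbor lists into a defaultdict by a
-- grouped, two-stage construction: an inverted index of occurrence positions per name first,
-- then per name the in-range neighbors of all its occurrences (objective: alternative).

-- ===== PORT A =====
-- loop body of A's 'for idx, name in enumerate(primary_hotspots)'; both indexed reads are in
-- range whenever they are evaluated, so pyGetD with default "" is exact here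
def pvAStep (xs : List String) (deps : PySem.Dict String (List String)) (p : Int × String) :
    PySem.Dict String (List String) :=
  let deps := if p.1 > 0 then
      deps.modify p.2 [] (· ++ [PySem.List.pyGetD xs (p.1 - 1) ""]) else deps
  if p.1 < (xs.length : Int) - 1 then
      deps.modify p.2 [] (· ++ [PySem.List.pyGetD xs (p.1 + 1) ""]) else deps

def default_dependencies_py (primary_hotspots : List String) : List (String × List String) :=
  ((PySem.List.enumerate primary_hotspots 0).foldl (pvAStep primary_hotspots)
    PySem.Dict.empty).items

-- ===== PORT B =====
-- stage 1 loop body: occ.setdefault(x, []).append(i)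
def pvOccStep (d : PySem.Dict String (List Int)) (p : Int × String) :
    PySem.Dict String (List Int) :=
  d.modify p.2 [] (· ++ [p.1])

-- B's inner comprehension 'for j in (i-1, i+1) if 0 <= j < n: xs[j]'; the filter keeps j in
-- range, so pyGetD with default "" is exact here
def pvBVals (xs : List String) (i : Int) : List String :=
  (([i - 1, i + 1]).filter
      (fun j => decide (0 ≤ j) && decide (j < (xs.length : Int)))).map
    (fun j => PySem.List.pyGetD xs j "")

def default_dependencies_py_alt (primary_hotspots : List String) : List (String × List String) :=
  if primary_hotspots.length < 2 then [] else
    ((PySem.List.enumerate primary_hotspots 0).foldl pvOccStep PySem.Dict.empty).items.map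
      (fun q => (q.1, q.2.flatMap (pvBVals primary_hotspots)))

-- ===== PRECONDITION & SPEC =====
def Spec_default_dependencies_py (primary_hotspots : List String) (out : List (String × List String)) : Prop := out = default_dependencies_py_alt primary_hotspots
instance (primary_hotspots : List String) (out : List (String × List String)) : Decidable (Spec_default_dependencies_py primary_hotspots out) := by unfold Spec_default_dependencies_py; infer_instance

-- ===== CLAIM (what is proved, stated in full; the proofs are below) =====
def Claim_equal_default_dependencies_py : Prop := ∀ (primary_hotspots : List String), Dom_default_dependencies_py primary_hotspots → Spec_default_dependencies_py primary_hotspots (default_dependencies_py primary_hotspots)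

-- ===== LEMMAS AND PROOFS =====

-- the (key, value) events A's loop body at p feeds into the dict, in order
def pvEv (xs : List String) (p : Int × String) : List (String × String) :=
  (if p.1 > 0 then [(p.2, PySem.List.pyGetD xs (p.1 - 1) "")] else []) ++
  (if p.1 < (xs.length : Int) - 1 then [(p.2, PySem.List.pyGetD xs (p.1 + 1) "")] else [])

-- A's loop body is the event list folded one modify at a time
theorem pvAStep_eq_foldl (xs : List String) (d : PySem.Dict String (List String))
    (p : Int × String) :
    pvAStep xs d p = (pvEv xs p).foldl (fun d q => d.modify q.1 [] (· ++ [q.2])) d := by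
  unfold pvAStep pvEv
  split_ifs <;> simp

-- folding over a flatMap is the nested fold
theorem pv_foldl_flatMap {α β γ : Type} (l : List α) (f : α → List β) (g : γ → β → γ)
    (i : γ) : (l.flatMap f).foldl g i = l.foldl (fun a x => (f x).foldl g a) i := by
  induction l generalizing i with
  | nil => rfl
  | cons h t ih => simp [List.flatMap_cons, List.foldl_append, ih]

-- A's whole fold is one fold over the flattened event list
theorem pvA_fold_eq (xs : List String) :
    (PySem.List.enumerate xs 0).foldl (pvAStep xs) PySem.Dict.empty
      = ((PySem.List.enumerate xs 0).flatMap (pvEv xs)).foldl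
          (fun d q => d.modify q.1 [] (· ++ [q.2])) PySem.Dict.empty := by
  rw [pv_foldl_flatMap]
  apply PySem.List.foldl_congr_mem
  intro d p _
  exact pvAStep_eq_foldl xs d p

-- updating a set already containing c with copies of c does nothing
theorem pv_update_const_aux (b : List String) (c : String) (hb : ∀ y ∈ b, y = c)
    (s : PySem.Set String) :
    PySem.Set.update (PySem.Set.add s c) b = PySem.Set.add s c := by
  induction b generalizing s with
  | nil => rfl
  | cons z t ih =>
    have hz : z = c := hb z List.mem_cons_self
    rw [PySem.Set.update_cons, hz,
      PySem.Set.add_of_mem ((PySem.Set.mem_add s c c).mpr (Or.inr rfl))]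
    exact ih (fun y hy => hb y (List.mem_cons_of_mem _ hy)) s

-- updating a set with a nonempty list of copies of c is a single add
theorem pv_update_const {s : PySem.Set String} {b : List String} {c : String}
    (hb : ∀ y ∈ b, y = c) (hne : b ≠ []) : PySem.Set.update s b = PySem.Set.add s c := by
  match b with
  | [] => exact absurd rfl hne
  | y :: rest =>
    have hy : y = c := hb y List.mem_cons_self
    rw [PySem.Set.update_cons, hy]
    exact pv_update_const_aux rest c (fun z hz => hb z (List.mem_cons_of_mem _ hz)) s

-- deduping a flatMap of nonempty constant blocks is deduping the block keys
theorem pv_dedup_blocks (l : List (Int × String)) (g : Int × String → List String)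
    (h : ∀ p ∈ l, (∀ y ∈ g p, y = p.2) ∧ g p ≠ []) :
    PySem.Set.ofList (l.flatMap g) = PySem.Set.ofList (l.map Prod.snd) := by
  induction l using List.reverseRecOn with
  | nil => rfl
  | append_singleton l p ih =>
    have hp := h p (by simp)
    simp only [List.flatMap_append, List.flatMap_cons, List.flatMap_nil,
      List.append_nil, List.map_append, List.map_cons, List.map_nil]
    rw [PySem.Set.ofList_append, PySem.Set.ofList_append_singleton,
      pv_update_const hp.1 hp.2, ih (fun q hq => h q (List.mem_append_left _ hq))]

-- every event of index p carries key p.2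
theorem pvEv_fst (xs : List String) (p : Int × String) (q : String × String)
    (hq : q ∈ pvEv xs p) : q.1 = p.2 := by
  unfold pvEv at hq
  split_ifs at hq <;> simp_all
  rcases hq with rfl | rfl <;> rfl

-- the event block of an in-range index is nonempty when the list has ≥ 2 elements
theorem pvEv_ne_nil (xs : List String) (p : Int × String) (h2 : 2 ≤ xs.length)
    (h0 : 0 ≤ p.1) (hn : p.1 < (xs.length : Int)) : pvEv xs p ≠ [] := by
  unfold pvEv
  split_ifs <;> simp_all
  omega

-- keys of the event stream dedupe to the names, for n ≥ 2
theorem pv_keys_eq (xs : List String) (h2 : 2 ≤ xs.length) :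
    PySem.Set.ofList (((PySem.List.enumerate xs 0).flatMap (pvEv xs)).map Prod.fst)
      = PySem.List.dedup xs := by
  rw [List.map_flatMap]
  rw [pv_dedup_blocks _ _ ?_]
  · rw [PySem.List.map_snd_enumerate, PySem.List.dedup_eq_ofList]
  · intro p hp
    obtain ⟨k, hk, rfl⟩ := (PySem.List.mem_enumerate_iff _ _ _).mp hp
    refine ⟨?_, ?_⟩
    · intro y hy
      obtain ⟨q, hq, rfl⟩ := List.mem_map.mp hy
      exact pvEv_fst xs _ q hq
    · intro hnil
      exact pvEv_ne_nil xs _ h2 (by simp) (by simp; omega)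
        (List.map_eq_nil_iff.mp hnil)

theorem pv_flatMap_filter {α β : Type} (l : List α) (p : α → Bool) (f : α → List β) :
    (l.filter p).flatMap f = l.flatMap (fun x => if p x then f x else []) := by
  induction l with
  | nil => rfl
  | cons h t ih =>
    by_cases hp : p h <;> simp [hp, ih]

theorem pv_flatMap_congr {α β : Type} (l : List α) (f g : α → List β)
    (h : ∀ x ∈ l, f x = g x) : l.flatMap f = l.flatMap g := by
  induction l with
  | nil => rfl
  | cons a t ih =>
    rw [List.flatMap_cons, List.flatMap_cons, h a List.mem_cons_self,
      ih (fun x hx => h x (List.mem_cons_of_mem _ hx))]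

-- the values of index p's event block are B's gathered neighbors of p
theorem pvEv_map_snd (xs : List String) (i : Int) (x : String) (h0 : 0 ≤ i)
    (hn : i < (xs.length : Int)) :
    (pvEv xs (i, x)).map (fun q => q.2) = pvBVals xs i := by
  unfold pvEv pvBVals
  by_cases h1 : i > 0 <;> by_cases hl : i < (xs.length : Int) - 1 <;>
    simp [h1, hl, List.filter_cons] <;> split_ifs <;> simp_all <;> omega

-- per-name values: the filtered event stream is B's gathered neighbor list
theorem pv_vals_eq (xs : List String) (name : String) :
    ((((PySem.List.enumerate xs 0).flatMap (pvEv xs)).filter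
        (fun q => q.1 == name)).map (fun x => x.2))
      = ((PySem.List.enumerate xs 0).filter (fun p => p.2 == name)).flatMap
          (fun p => pvBVals xs p.1) := by
  rw [List.filter_flatMap, List.map_flatMap, pv_flatMap_filter]
  apply pv_flatMap_congr
  intro p hp
  obtain ⟨k, hk, rfl⟩ := (PySem.List.mem_enumerate_iff _ _ _).mp hp
  by_cases hname : (xs[k] == name) = true
  · rw [if_pos hname,
      List.filter_eq_self.mpr (fun q hq => by rw [pvEv_fst xs _ q hq]; exact hname)]
    exact pvEv_map_snd xs _ xs[k] (by simp) (by simp; omega)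
  · rw [if_neg (by simp_all),
      List.filter_eq_nil_iff.mpr
        (fun q hq => by rw [pvEv_fst xs _ q hq]; simp_all), List.map_nil]

-- stage 2 over the inverted index is the per-name gather over filtered positions
theorem pv_idx_flat (xs : List String) (name : String) :
    ((((PySem.List.enumerate xs 0).map (fun p => (p.2, p.1))).filter
        (fun q => q.1 == name)).map (fun x => x.2)).flatMap (pvBVals xs)
      = ((PySem.List.enumerate xs 0).filter (fun p => p.2 == name)).flatMap
          (fun p => pvBVals xs p.1) := by
  rw [List.filter_map, List.map_map, List.flatMap_map]
  rfl

theorem default_dependencies_py_eq (xs : List String) :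
    default_dependencies_py xs = default_dependencies_py_alt xs := by
  match xs with
  | [] => rfl
  | [x] =>
    show (List.foldl (pvAStep [x]) PySem.Dict.empty
        (PySem.List.enumerate [x] 0)).items = _
    rw [PySem.List.enumerate_cons, PySem.List.enumerate_nil]
    simp only [List.foldl_cons, List.foldl_nil, pvAStep]
    rfl
  | a :: b :: t =>
    have h2 : 2 ≤ (a :: b :: t).length := by simp
    unfold default_dependencies_py default_dependencies_py_alt
    rw [if_neg (by simp), pvA_fold_eq]
    have hB : (PySem.List.enumerate (a :: b :: t) 0).foldl pvOccStep PySem.Dict.empty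
        = ((PySem.List.enumerate (a :: b :: t) 0).map (fun p => (p.2, p.1))).foldl
            (fun d q => d.modify q.1 [] (· ++ [q.2])) PySem.Dict.empty := by
      rw [List.foldl_map]
      rfl
    rw [hB]
    have hcomp : (((PySem.List.enumerate (a :: b :: t) 0).map
        (fun p => (p.2, p.1))).map Prod.fst) = (a :: b :: t) := by
      rw [List.map_map]
      exact PySem.List.map_snd_enumerate _ _
    have hndA : (((PySem.List.enumerate (a :: b :: t) 0).flatMap (pvEv (a :: b :: t))).foldl
        (fun d q => d.modify q.1 [] (· ++ [q.2])) PySem.Dict.empty).keys.Nodup :=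
      PySem.Dict.nodup_keys_foldl_modify_key _ Prod.fst []
        (fun _ q => (· ++ [q.2])) PySem.Dict.empty (by simp [PySem.Dict.keys_empty])
    have hndB : ((((PySem.List.enumerate (a :: b :: t) 0).map (fun p => (p.2, p.1))).foldl
        (fun d q => d.modify q.1 [] (· ++ [q.2])) PySem.Dict.empty)).keys.Nodup :=
      PySem.Dict.nodup_keys_foldl_modify_key _ Prod.fst []
        (fun _ q => (· ++ [q.2])) PySem.Dict.empty (by simp [PySem.Dict.keys_empty])
    rw [PySem.Dict.items_eq_map_keys _ hndA [], PySem.Dict.items_eq_map_keys _ hndB []]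
    rw [PySem.Dict.keys_foldl_modify_key _ Prod.fst [] (fun _ q => (· ++ [q.2]))]
    rw [PySem.Dict.keys_foldl_modify_key
      ((PySem.List.enumerate (a :: b :: t) 0).map (fun p => (p.2, p.1)))
      Prod.fst [] (fun _ q => (· ++ [q.2]))]
    rw [PySem.Dict.keys_empty, PySem.Dict.keys_empty, PySem.Set.update_nil_left,
      PySem.Set.update_nil_left, pv_keys_eq _ h2, PySem.List.dedup_eq_ofList, hcomp,
      List.map_map]
    apply List.map_congr_left
    intro name _
    have hv := pv_vals_eq (a :: b :: t) name
    have hx := pv_idx_flat (a :: b :: t) name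
    simp only [Function.comp_apply, PySem.Dict.getD_foldl_modify_append,
      PySem.Dict.getD_empty, List.nil_append, hv, hx]

-- ===== VERDICT (by name: the statement is the Claim_ definition above) =====
theorem default_dependencies_py_spec : Claim_equal_default_dependencies_py := by
  intro xs _
  unfold Spec_default_dependencies_py
  exact default_dependencies_py_eq xs
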